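-- pv_equiv track=rewrite | github.com/pypi-data/pypi-mirror-96 | packages/OASYS1-ESRF-Extensions/OASYS1-ESRF-Extensions-0.0.28.tar.gz/OASYS1-ESRF-Extensions-0.0.28/orangecontrib/esrf/xoppy/widgets/extension/Transfocator.py | List_Product
-- ===== SOURCE A (Python) =====
-- def List_Product(list):
--     L = []
--     l = 1
--     for k in range(len(list[0])):
--         for i in range(len(list)):
--             l = l * list[i][k]
--         L.append(l)
--         l = 1
--     return (L)
-- ===== SOURCE B (Python) =====
-- def List_Product(list):
--     n = len(list[0])
--     result = [1] * n
--     for row in list: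
--         for k in range(n):
--             result[k] *= row[k]
--     return result
-- ===== Notes on version B (the rewrite author's own statement) =====
-- stated objective: alternative
-- what changed: Interchanged the loop nesting: instead of a scalar accumulator computed column-by-column with an inner scan over rows, B keeps a per-column accumulator array [1]*n and makes one pass over the rows, multiplying each column slot in place.
import Mathlib
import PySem

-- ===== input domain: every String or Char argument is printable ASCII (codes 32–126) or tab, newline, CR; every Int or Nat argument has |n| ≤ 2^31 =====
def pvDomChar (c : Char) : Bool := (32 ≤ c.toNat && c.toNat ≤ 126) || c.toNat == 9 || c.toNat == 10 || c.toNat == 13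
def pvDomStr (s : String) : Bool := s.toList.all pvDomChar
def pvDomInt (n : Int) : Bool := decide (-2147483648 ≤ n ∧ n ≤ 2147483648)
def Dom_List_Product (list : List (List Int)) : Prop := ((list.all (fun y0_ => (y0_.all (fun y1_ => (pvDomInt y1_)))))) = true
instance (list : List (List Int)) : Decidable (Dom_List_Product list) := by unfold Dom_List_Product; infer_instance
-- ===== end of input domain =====

-- B interchanges the loops: one pass over the rows with a per-column accumulator array,
-- instead of A's column-by-column scalar accumulator with an inner scan over all rows.

-- ===== PORT A =====
-- A: L = []; l = 1; for k in range(len(list[0])): (for i in range(len(list)): l *= list[i][k]); L.append(l); l = 1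
def List_Product (list : List (List Int)) : List Int :=
  ((PySem.List.pyRange 0 ((PySem.List.pyGetD list 0 []).length : Int) 1).foldl
    (fun (st : List Int × Int) k =>
      let l := (PySem.List.pyRange 0 (list.length : Int) 1).foldl
        (fun l i => l * PySem.List.pyGetD (PySem.List.pyGetD list i []) k 0) st.2
      (st.1 ++ [l], 1))
    ([], 1)).1

-- ===== PORT B =====
-- B: n = len(list[0]); result = [1]*n; for row in list: for k in range(n): result[k] *= row[k]
def List_Product_alt (list : List (List Int)) : List Int :=
  let n := (PySem.List.pyGetD list 0 []).length
  list.foldl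
    (fun result row =>
      (PySem.List.pyRange 0 (n : Int) 1).foldl
        (fun res k =>
          PySem.List.pySetD res k (PySem.List.pyGetD res k 0 * PySem.List.pyGetD row k 0))
        result)
    (List.replicate n 1)

-- ===== PRECONDITION & SPEC =====
-- Pre_ excludes exactly the inputs where the Pythons raise IndexError: the empty list
-- (list[0]) and ragged inputs with a row shorter than row 0 (list[i][k] / row[k]).
def Pre_List_Product (list : List (List Int)) : Prop :=
  list ≠ [] ∧ ∀ row ∈ list, (list.headD []).length ≤ row.length
instance (list : List (List Int)) : Decidable (Pre_List_Product list) := by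
  unfold Pre_List_Product; infer_instance
def pvWitness_List_Product : List (List Int) := [[1, 2], [3, 4]]

def Spec_List_Product (list : List (List Int)) (out : List Int) : Prop := out = List_Product_alt list
instance (list : List (List Int)) (out : List Int) : Decidable (Spec_List_Product list out) := by unfold Spec_List_Product; infer_instance

-- ===== CLAIM (what is proved, stated in full; the proofs are below) =====
def Claim_equal_List_Product : Prop := ∀ (list : List (List Int)), Dom_List_Product list → Pre_List_Product list → Spec_List_Product list (List_Product list)

-- ===== LEMMAS AND PROOFS =====

-- the column product both programs compute at column k
def pvColProd (list : List (List Int)) (k : Nat) : Int :=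
  list.foldl (fun l row => l * row.getD k 0) 1

-- A's outer loop: appending with a state that is reset to 1 after every append
theorem pvFoldAppend (ks : List Int) (g : Int → Int → Int) :
    ∀ (L : List Int),
      (ks.foldl (fun (st : List Int × Int) k => (st.1 ++ [g st.2 k], 1)) (L, 1))
        = (L ++ ks.map (g 1), 1) := by
  induction ks with
  | nil => simp
  | cons k ks ih => intro L; simp [List.foldl_cons, ih]

theorem List_Product_eq_map (list : List (List Int)) :
    List_Product list
      = (List.range (PySem.List.pyGetD list 0 []).length).map (pvColProd list) := by
  unfold List_Product
  have h := pvFoldAppend (PySem.List.pyRange 0 ((PySem.List.pyGetD list 0 []).length : Int) 1)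
    (fun l0 k => (PySem.List.pyRange 0 (list.length : Int) 1).foldl
      (fun l i => l * PySem.List.pyGetD (PySem.List.pyGetD list i []) k 0) l0) []
  have hinner : ∀ k : Int,
      (PySem.List.pyRange 0 (list.length : Int) 1).foldl
        (fun l i => l * PySem.List.pyGetD (PySem.List.pyGetD list i []) k 0) 1
        = list.foldl (fun l row => l * PySem.List.pyGetD row k 0) 1 :=
    fun k => PySem.List.foldl_pyRange_zero_pyGetD' list []
      (fun l row => l * PySem.List.pyGetD row k 0) 1
  simp only [h, List.nil_append, hinner]
  rw [PySem.List.pyRange_zero_nat, List.map_map]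
  apply List.map_congr_left
  intro k _
  simp [pvColProd, Function.comp, PySem.List.pyGetD_natCast]

-- B's inner loop (Nat form): elementwise effect
theorem pvInnerLen (row : List Int) :
    ∀ (m : Nat) (res : List Int),
      ((List.range m).foldl
        (fun (r : List Int) k => r.set k (r.getD k 0 * row.getD k 0)) res).length
        = res.length := by
  intro m
  induction m with
  | zero => simp
  | succ m ih =>
    intro res
    rw [List.range_succ, List.foldl_append]
    simp only [List.foldl_cons, List.foldl_nil, List.length_set]
    exact ih res

theorem pvInnerGet (row : List Int) :
    ∀ (m : Nat) (res : List Int) (j : Nat),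
      ((List.range m).foldl
        (fun (r : List Int) k => r.set k (r.getD k 0 * row.getD k 0)) res)[j]?
        = if j < m then (res[j]?.map (fun v => v * row.getD j 0)) else res[j]? := by
  intro m
  induction m with
  | zero => simp
  | succ m ih =>
    intro res j
    rw [List.range_succ, List.foldl_append]
    simp only [List.foldl_cons, List.foldl_nil]
    have hFlen := pvInnerLen row m res
    have hFm := ih res m
    rw [if_neg (by omega)] at hFm
    rcases Nat.lt_trichotomy j m with hj | hj | hj
    · rw [List.getElem?_set_ne (show m ≠ j by omega), ih res j,
        if_pos hj, if_pos (by omega)]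
    · subst hj
      rw [if_pos (by omega)]
      rcases hres : res[j]? with _ | v
      · have hj' : res.length ≤ j := List.getElem?_eq_none_iff.mp hres
        rw [List.set_eq_of_length_le (by omega), hFm, hres]
        simp
      · have hj' : j < res.length := by
          rcases Nat.lt_or_ge j res.length with h | h
          · exact h
          · rw [List.getElem?_eq_none h] at hres; cases hres
        rw [List.getElem?_set_self (by omega), List.getD_eq_getElem?_getD, hFm, hres]
        rfl
    · rw [List.getElem?_set_ne (show m ≠ j by omega), ih res j,
        if_neg (by omega), if_neg (by omega)]

-- B's inner loop on a square accumulator: a fresh map over the columns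
theorem pvInnerMap (row res : List Int) (n : Nat) (hres : res.length = n) :
    ((List.range n).foldl
      (fun (r : List Int) k => r.set k (r.getD k 0 * row.getD k 0)) res)
      = (List.range n).map (fun k => res.getD k 0 * row.getD k 0) := by
  apply List.ext_getElem?
  intro j
  rw [pvInnerGet]
  by_cases hj : j < n
  · rw [if_pos hj, List.getElem?_map, List.getElem?_range hj]
    have : res[j]? = some res[j] := List.getElem?_eq_getElem (by omega)
    simp [this, List.getD_eq_getElem?_getD]
  · rw [if_neg hj, List.getElem?_eq_none (by omega),
      List.getElem?_eq_none (by simp; omega)]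

-- B's outer loop: the invariant over the per-column accumulator
theorem pvOuterB (n : Nat) :
    ∀ (list : List (List Int)) (res : List Int), res.length = n →
      (list.foldl
        (fun result row =>
          (List.range n).foldl
            (fun (r : List Int) k => r.set k (r.getD k 0 * row.getD k 0)) result)
        res)
        = (List.range n).map
            (fun k => list.foldl (fun l row => l * row.getD k 0) (res.getD k 0)) := by
  intro list
  induction list with
  | nil =>
    intro res hres
    simp only [List.foldl_nil]
    apply List.ext_getElem?
    intro j
    by_cases hj : j < n
    · rw [List.getElem?_map, List.getElem?_range hj]
      have : res[j]? = some res[j] := List.getElem?_eq_getElem (by omega)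
      simp [this, List.getD_eq_getElem?_getD]
    · rw [List.getElem?_eq_none (by omega),
        List.getElem?_eq_none (by simpa using by omega)]
  | cons row rest ih =>
    intro res hres
    rw [List.foldl_cons, pvInnerMap row res n hres, ih _ (by simp)]
    apply List.map_congr_left
    intro k hk
    simp only [List.mem_range] at hk
    rw [List.foldl_cons]
    congr 1
    simp [List.getD_eq_getElem?_getD, List.getElem?_map, List.getElem?_range hk]

theorem List_Product_alt_eq_map (list : List (List Int)) :
    List_Product_alt list
      = (List.range (PySem.List.pyGetD list 0 []).length).map (pvColProd list) := by
  unfold List_Product_alt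
  set n := (PySem.List.pyGetD list 0 []).length with hn
  have hsimp : (fun (result : List Int) (row : List Int) =>
      (PySem.List.pyRange 0 (n : Int) 1).foldl
        (fun res k =>
          PySem.List.pySetD res k (PySem.List.pyGetD res k 0 * PySem.List.pyGetD row k 0))
        result)
      = (fun (result : List Int) (row : List Int) =>
      (List.range n).foldl
        (fun (r : List Int) k => r.set k (r.getD k 0 * row.getD k 0)) result) := by
    funext result row
    rw [PySem.List.pyRange_zero_nat, List.foldl_map]
    simp [PySem.List.pySetD_natCast, PySem.List.pyGetD_natCast]
  simp only [hsimp]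
  rw [pvOuterB n list (List.replicate n 1) (by simp)]
  apply List.map_congr_left
  intro k hk
  simp only [List.mem_range] at hk
  unfold pvColProd
  congr 1
  simp [List.getD_eq_getElem?_getD, hk]

-- ===== VERDICT (by name: the statement is the Claim_ definition above) =====
theorem List_Product_spec : Claim_equal_List_Product := by
  intro list _ _
  unfold Spec_List_Product
  rw [List_Product_eq_map, List_Product_alt_eq_map]
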